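-- pv_equiv track=rewrite | github.com/virg1n/temp2 | red_dpo.py | _candidate_max_lengths
-- ===== SOURCE A (Python) =====
-- def _candidate_max_lengths(configured_length: int) -> list[int]:
--     candidates = [configured_length, 2048, 1536, 1024, 768, 512]
--     deduped: list[int] = []
--     for length in candidates:
--         bounded = min(int(configured_length), int(length))
--         if bounded > 0 and bounded not in deduped:
--             deduped.append(bounded)
--     return deduped
-- ===== SOURCE B (Python) =====
-- def _candidate_max_lengths(configured_length: int) -> list[int]:
--     cl = int(configured_length)
--     if cl <= 0:
--         return []
--     return [cl] + [c for c in (2048, 1536, 1024, 768, 512) if c < cl]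
-- ===== Notes on version B (the rewrite author's own statement) =====
-- stated objective: simpler
-- what changed: Replaces the min()-bounding and membership-dedup loop with a direct guard (cl <= 0 -> []) plus a strict comparison filter over the fixed constants, since min(cl, c) duplicates cl exactly when c >= cl.
import Mathlib
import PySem

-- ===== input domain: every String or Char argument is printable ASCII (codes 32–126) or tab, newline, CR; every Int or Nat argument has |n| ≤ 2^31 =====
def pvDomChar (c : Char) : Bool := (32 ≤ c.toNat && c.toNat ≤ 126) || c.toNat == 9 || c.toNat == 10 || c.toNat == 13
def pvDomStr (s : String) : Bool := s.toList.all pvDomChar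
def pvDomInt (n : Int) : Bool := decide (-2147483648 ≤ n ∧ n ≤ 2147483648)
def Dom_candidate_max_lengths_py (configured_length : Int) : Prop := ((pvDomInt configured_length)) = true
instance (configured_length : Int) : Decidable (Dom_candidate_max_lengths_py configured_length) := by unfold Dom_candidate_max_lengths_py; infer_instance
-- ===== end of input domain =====

-- B replaces A's min()-bounding and membership-dedup loop with a cl<=0 guard plus a strict
-- comparison filter over the fixed constants (objective: simpler); equivalence proved for all Int inputs in Dom.

-- ===== PORT A =====
-- bounded not in deduped → ¬ deduped.contains bounded; loop = foldl over the candidate list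
def candidate_max_lengths_py (configured_length : Int) : List Int :=
  let candidates : List Int := [configured_length, 2048, 1536, 1024, 768, 512]
  candidates.foldl (fun deduped length =>
    let bounded := min configured_length length
    if bounded > 0 ∧ ¬ deduped.contains bounded then deduped ++ [bounded] else deduped) []

-- ===== PORT B =====
def candidate_max_lengths_py_alt (configured_length : Int) : List Int :=
  if configured_length ≤ 0 then []
  else configured_length :: (([2048, 1536, 1024, 768, 512] : List Int).filter (fun c => c < configured_length))

-- ===== PRECONDITION & SPEC =====
def Spec_candidate_max_lengths_py (configured_length : Int) (out : List Int) : Prop := out = candidate_max_lengths_py_alt configured_length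
instance (configured_length : Int) (out : List Int) : Decidable (Spec_candidate_max_lengths_py configured_length out) := by unfold Spec_candidate_max_lengths_py; infer_instance

-- ===== CLAIM (what is proved, stated in full; the proofs are below) =====
def Claim_equal_candidate_max_lengths_py : Prop := ∀ (configured_length : Int), Dom_candidate_max_lengths_py configured_length → Spec_candidate_max_lengths_py configured_length (candidate_max_lengths_py configured_length)

-- ===== LEMMAS AND PROOFS =====

-- ===== VERDICT (by name: the statement is the Claim_ definition above) =====
theorem candidate_max_lengths_py_spec : Claim_equal_candidate_max_lengths_py := by
  intro cl _
  unfold Spec_candidate_max_lengths_py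
  by_cases h0 : cl ≤ 0
  · have hm : ∀ c : Int, ¬ (min cl c > 0) := fun c => by omega
    simp [candidate_max_lengths_py, candidate_max_lengths_py_alt, List.foldl, hm, h0]
  rcases (by omega : 0 < cl ∧ cl ≤ 512 ∨ 512 < cl ∧ cl ≤ 768 ∨ 768 < cl ∧ cl ≤ 1024 ∨
      1024 < cl ∧ cl ≤ 1536 ∨ 1536 < cl ∧ cl ≤ 2048 ∨ 2048 < cl) with
    ⟨h1,h2⟩|⟨h1,h2⟩|⟨h1,h2⟩|⟨h1,h2⟩|⟨h1,h2⟩|h1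
  · -- region 0 < cl ≤ 512
    have e0 : cl ≤ (2048:Int) := by omega
    have f1 : ¬ ((2048:Int) < cl) := by omega
    have e2 : cl ≤ (1536:Int) := by omega
    have f3 : ¬ ((1536:Int) < cl) := by omega
    have e4 : cl ≤ (1024:Int) := by omega
    have f5 : ¬ ((1024:Int) < cl) := by omega
    have e6 : cl ≤ (768:Int) := by omega
    have f7 : ¬ ((768:Int) < cl) := by omega
    have e8 : cl ≤ (512:Int) := by omega
    have f9 : ¬ ((512:Int) < cl) := by omega
    have hp : 0 < cl := by omega
    simp [candidate_max_lengths_py, candidate_max_lengths_py_alt, List.foldl, min_def, *]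
  · -- region 512 < cl ≤ 768
    have e0 : cl ≤ (2048:Int) := by omega
    have f1 : ¬ ((2048:Int) < cl) := by omega
    have e2 : cl ≤ (1536:Int) := by omega
    have f3 : ¬ ((1536:Int) < cl) := by omega
    have e4 : cl ≤ (1024:Int) := by omega
    have f5 : ¬ ((1024:Int) < cl) := by omega
    have e6 : cl ≤ (768:Int) := by omega
    have f7 : ¬ ((768:Int) < cl) := by omega
    have e8 : ¬ cl ≤ (512:Int) := by omega
    have f9 : (512:Int) < cl := by omega
    have g10 : ¬ ((512:Int) = cl) := by omega
    have hp : 0 < cl := by omega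
    simp [candidate_max_lengths_py, candidate_max_lengths_py_alt, List.foldl, min_def, *]
  · -- region 768 < cl ≤ 1024
    have e0 : cl ≤ (2048:Int) := by omega
    have f1 : ¬ ((2048:Int) < cl) := by omega
    have e2 : cl ≤ (1536:Int) := by omega
    have f3 : ¬ ((1536:Int) < cl) := by omega
    have e4 : cl ≤ (1024:Int) := by omega
    have f5 : ¬ ((1024:Int) < cl) := by omega
    have e6 : ¬ cl ≤ (768:Int) := by omega
    have f7 : (768:Int) < cl := by omega
    have g8 : ¬ ((768:Int) = cl) := by omega
    have e9 : ¬ cl ≤ (512:Int) := by omega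
    have f10 : (512:Int) < cl := by omega
    have g11 : ¬ ((512:Int) = cl) := by omega
    have hp : 0 < cl := by omega
    simp [candidate_max_lengths_py, candidate_max_lengths_py_alt, List.foldl, min_def, *]
  · -- region 1024 < cl ≤ 1536
    have e0 : cl ≤ (2048:Int) := by omega
    have f1 : ¬ ((2048:Int) < cl) := by omega
    have e2 : cl ≤ (1536:Int) := by omega
    have f3 : ¬ ((1536:Int) < cl) := by omega
    have e4 : ¬ cl ≤ (1024:Int) := by omega
    have f5 : (1024:Int) < cl := by omega
    have g6 : ¬ ((1024:Int) = cl) := by omega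
    have e7 : ¬ cl ≤ (768:Int) := by omega
    have f8 : (768:Int) < cl := by omega
    have g9 : ¬ ((768:Int) = cl) := by omega
    have e10 : ¬ cl ≤ (512:Int) := by omega
    have f11 : (512:Int) < cl := by omega
    have g12 : ¬ ((512:Int) = cl) := by omega
    have hp : 0 < cl := by omega
    simp [candidate_max_lengths_py, candidate_max_lengths_py_alt, List.foldl, min_def, *]
  · -- region 1536 < cl ≤ 2048
    have e0 : cl ≤ (2048:Int) := by omega
    have f1 : ¬ ((2048:Int) < cl) := by omega
    have e2 : ¬ cl ≤ (1536:Int) := by omega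
    have f3 : (1536:Int) < cl := by omega
    have g4 : ¬ ((1536:Int) = cl) := by omega
    have e5 : ¬ cl ≤ (1024:Int) := by omega
    have f6 : (1024:Int) < cl := by omega
    have g7 : ¬ ((1024:Int) = cl) := by omega
    have e8 : ¬ cl ≤ (768:Int) := by omega
    have f9 : (768:Int) < cl := by omega
    have g10 : ¬ ((768:Int) = cl) := by omega
    have e11 : ¬ cl ≤ (512:Int) := by omega
    have f12 : (512:Int) < cl := by omega
    have g13 : ¬ ((512:Int) = cl) := by omega
    have hp : 0 < cl := by omega
    simp [candidate_max_lengths_py, candidate_max_lengths_py_alt, List.foldl, min_def, *]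
  · -- region 2048 < cl
    have e0 : ¬ cl ≤ (2048:Int) := by omega
    have f1 : (2048:Int) < cl := by omega
    have g2 : ¬ ((2048:Int) = cl) := by omega
    have e3 : ¬ cl ≤ (1536:Int) := by omega
    have f4 : (1536:Int) < cl := by omega
    have g5 : ¬ ((1536:Int) = cl) := by omega
    have e6 : ¬ cl ≤ (1024:Int) := by omega
    have f7 : (1024:Int) < cl := by omega
    have g8 : ¬ ((1024:Int) = cl) := by omega
    have e9 : ¬ cl ≤ (768:Int) := by omega
    have f10 : (768:Int) < cl := by omega
    have g11 : ¬ ((768:Int) = cl) := by omega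
    have e12 : ¬ cl ≤ (512:Int) := by omega
    have f13 : (512:Int) < cl := by omega
    have g14 : ¬ ((512:Int) = cl) := by omega
    have hp : 0 < cl := by omega
    simp [candidate_max_lengths_py, candidate_max_lengths_py_alt, List.foldl, min_def, *]
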